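-- pv_equiv track=rewrite | github.com/AlekseiRiabinin/Python_data_eng | core_python_concepts/comprehensions/generator.py | sum_until_limit
-- ===== SOURCE A (Python) =====
-- from collections.abc import Generator
--
-- def sum_until_limit(limit: int) -> Generator[int, None, str]:
--     """Yields numbers until sum exceeds limit, returns status."""
--     total = 0
--     for i in range(1, 100):
--         total += i
--         yield i
--         if total >= limit:
--             return f"Reached limit {limit}"
--     return "Completed all iterations"
-- ===== SOURCE B (Python) =====
-- def sum_until_limit(limit: int):
--     """Yields numbers until sum meets limit, returns status.
--
--     Binary search for the stop point instead of accumulating a running sum: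
--     lo becomes the smallest n in [1, 99] with n*(n+1)//2 >= limit (or 99 if
--     no such n exists), then the prefix 1..lo is emitted in one go.
--     """
--     lo, hi = 1, 99
--     while lo < hi:
--         mid = (lo + hi) // 2
--         if mid * (mid + 1) // 2 >= limit:
--             hi = mid
--         else:
--             lo = mid + 1
--     yield from range(1, lo + 1)
--     if lo * (lo + 1) // 2 >= limit:
--         return f"Reached limit {limit}"
--     return "Completed all iterations"
-- ===== Notes on version B (the rewrite author's own statement) =====
-- stated objective: alternative
-- what changed: B keeps no running sum: it binary-searches the smallest n in [1,99] whose triangular number n*(n+1)//2 reaches the limit (99 if none does) and yields range(1, n+1) in one go, instead of A's accumulate-and-test loop.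
import Mathlib
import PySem

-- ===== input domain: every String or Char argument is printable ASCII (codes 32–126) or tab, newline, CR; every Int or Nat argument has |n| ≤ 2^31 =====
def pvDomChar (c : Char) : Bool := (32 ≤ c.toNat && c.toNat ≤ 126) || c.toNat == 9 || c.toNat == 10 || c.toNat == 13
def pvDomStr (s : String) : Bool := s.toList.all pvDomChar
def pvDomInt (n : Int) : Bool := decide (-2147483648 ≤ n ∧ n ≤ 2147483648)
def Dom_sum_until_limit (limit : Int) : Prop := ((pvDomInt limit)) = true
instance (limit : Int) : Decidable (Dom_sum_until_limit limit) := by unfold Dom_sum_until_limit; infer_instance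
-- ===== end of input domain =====

-- B replaces A's accumulate-and-test loop by a binary search for the stop point
-- (alternative decomposition; equivalence of the yielded lists is proved below).
-- The generators' StopIteration return strings are outside the List Int equivalence.

-- ===== PORT A =====
-- the for-loop with its running total and early return, over range(1, 100)
def pvALoop (limit : Int) : List Int → Int → List Int
  | [], _ => []
  | i :: rest, total =>
    i :: (if total + i ≥ limit then [] else pvALoop limit rest (total + i))

def sum_until_limit (limit : Int) : List Int :=
  pvALoop limit (PySem.List.pyRange 1 100 1) 0

-- ===== PORT B =====
-- the while-loop: lo, hi narrowing by midpoint until lo = hi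
def pvBSearch (limit lo hi : Int) : Int :=
  if h : lo < hi then
    let mid := PySem.Int.floordiv (lo + hi) 2
    if PySem.Int.floordiv (mid * (mid + 1)) 2 ≥ limit then pvBSearch limit lo mid
    else pvBSearch limit (mid + 1) hi
  else lo
termination_by (hi - lo).toNat
decreasing_by
  · have := PySem.Int.floordiv_two_mid_bounds (le_of_lt h)
    have hm : PySem.Int.floordiv (lo + hi) 2 < hi := by
      have h2 : PySem.Int.floordiv (lo + hi) 2 = (lo + hi) / 2 :=
        PySem.Int.floordiv_eq_ediv_of_pos (by omega)
      omega
    omega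
  · have := PySem.Int.floordiv_two_mid_bounds (le_of_lt h)
    omega

def sum_until_limit_alt (limit : Int) : List Int :=
  PySem.List.pyRange 1 (pvBSearch limit 1 99 + 1) 1

-- ===== PRECONDITION & SPEC =====
def Spec_sum_until_limit (limit : Int) (out : List Int) : Prop := out = sum_until_limit_alt limit
instance (limit : Int) (out : List Int) : Decidable (Spec_sum_until_limit limit out) := by unfold Spec_sum_until_limit; infer_instance

-- ===== CLAIM (what is proved, stated in full; the proofs are below) =====
def Claim_equal_sum_until_limit : Prop := ∀ (limit : Int), Dom_sum_until_limit limit → Spec_sum_until_limit limit (sum_until_limit limit)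

-- ===== LEMMAS AND PROOFS =====

-- T m = m*(m+1)//2, the total after yielding 1..m
def pvT (m : Int) : Int := PySem.Int.floordiv (m * (m + 1)) 2

theorem pvT_eq (m : Int) : pvT m = m * (m + 1) / 2 :=
  PySem.Int.floordiv_eq_ediv_of_pos (by omega)

theorem pvT_step (a : Int) : pvT (a - 1) + a = pvT a := by
  rw [pvT_eq, pvT_eq, show a - 1 + 1 = a from by ring,
    show a * (a + 1) = (a - 1) * a + a * 2 from by ring,
    Int.add_mul_ediv_right _ _ (by omega : (2:Int) ≠ 0)]

theorem pvT_mono {m m' : Int} (h0 : 0 ≤ m) (h : m ≤ m') : pvT m ≤ pvT m' := by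
  rw [pvT_eq, pvT_eq]
  exact Int.ediv_le_ediv (by omega) (by nlinarith)

-- bsearch returns a value r with lo ≤ r ≤ hi, everything below r fails, and
-- (if r < hi) r itself succeeds
theorem pvBSearch_props (limit : Int) :
    ∀ (k : Nat) (lo hi : Int), 0 ≤ lo → lo ≤ hi → (hi - lo).toNat = k →
    lo ≤ pvBSearch limit lo hi ∧ pvBSearch limit lo hi ≤ hi ∧
    (∀ m, lo ≤ m → m < pvBSearch limit lo hi → pvT m < limit) ∧
    (pvBSearch limit lo hi < hi → limit ≤ pvT (pvBSearch limit lo hi)) := by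
  intro k
  induction k using Nat.strong_induction_on with
  | _ k ih =>
    intro lo hi hlo0 hlohi hk
    rw [pvBSearch]
    by_cases h : lo < hi
    · simp only [h, dif_pos]
      have hmid := PySem.Int.floordiv_two_mid_bounds (le_of_lt h)
      have hmidlt : PySem.Int.floordiv (lo + hi) 2 < hi := by
        have h2 : PySem.Int.floordiv (lo + hi) 2 = (lo + hi) / 2 :=
          PySem.Int.floordiv_eq_ediv_of_pos (by omega)
        omega
      set mid := PySem.Int.floordiv (lo + hi) 2 with hmdef
      by_cases hc : PySem.Int.floordiv (mid * (mid + 1)) 2 ≥ limit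
      · simp only [hc, if_pos]
        have := ih ((mid - lo).toNat) (by omega) lo mid hlo0 hmid.1 rfl
        obtain ⟨h1, h2, h3, h4⟩ := this
        refine ⟨h1, by omega, h3, ?_⟩
        intro hr
        by_cases hrm : pvBSearch limit lo mid < mid
        · exact h4 hrm
        · have : pvBSearch limit lo mid = mid := by omega
          rw [this]; exact hc
      · simp only [hc, if_neg, not_false_iff]
        have hcm : pvT mid < limit := by unfold pvT; omega
        have := ih ((hi - (mid + 1)).toNat) (by omega) (mid + 1) hi (by omega) (by omega) rfl
        obtain ⟨h1, h2, h3, h4⟩ := this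
        refine ⟨by omega, h2, ?_, h4⟩
        intro m hm1 hm2
        by_cases hmm : mid + 1 ≤ m
        · exact h3 m hmm hm2
        · calc pvT m ≤ pvT mid := pvT_mono (by omega) (by omega)
            _ < limit := hcm
    · simp only [h, dif_neg, not_false_iff]
      exact ⟨le_refl _, by omega, fun m h1 h2 => absurd h2 (by omega),
        fun hh => hh.elim⟩

-- A's loop when the limit is reached at n: yields exactly a..n
theorem pvALoop_reached :
    ∀ (k : Nat) (a limit n : Int), a ≤ n → n < a + k →
    (∀ m, a ≤ m → m < n → pvT m < limit) → limit ≤ pvT n →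
    pvALoop limit (PySem.List.pyRange a (a + k) 1) (pvT (a - 1)) =
      PySem.List.pyRange a (n + 1) 1 := by
  intro k
  induction k with
  | zero => intro a limit n h1 h2 _ _; omega
  | succ k ih =>
    intro a limit n h1 h2 hlt hge
    have hab : a < a + (k + 1 : Nat) := by omega
    rw [PySem.List.pyRange_one_cons hab, pvALoop, pvT_step]
    by_cases hc : pvT a ≥ limit
    · have hna : n = a := by
        by_contra hne
        exact absurd (hlt a (le_refl a) (by omega)) (by omega)
      simp only [hc, if_pos]
      rw [hna, PySem.List.pyRange_one_cons (by omega : a < a + 1),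
        PySem.List.pyRange_one_eq_nil (by omega)]
    · have hna : a < n := by
        rcases lt_or_eq_of_le h1 with h | h
        · exact h
        · exact absurd hge (by rw [← h]; omega)
      simp only [hc, if_neg, not_false_iff]
      have harg : a + (k + 1 : Nat) = (a + 1) + (k : Nat) := by push_cast; ring
      have := ih (a + 1) limit n (by omega) (by omega)
        (fun m hm1 hm2 => hlt m (by omega) hm2) hge
      rw [show a + 1 - 1 = a by ring] at this
      rw [harg, this, ← PySem.List.pyRange_one_cons (by omega : a < n + 1)]

-- A's loop when the limit is never reached: yields the whole range
theorem pvALoop_complete :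
    ∀ (k : Nat) (a limit : Int),
    (∀ m, a ≤ m → m < a + k → pvT m < limit) →
    pvALoop limit (PySem.List.pyRange a (a + k) 1) (pvT (a - 1)) =
      PySem.List.pyRange a (a + k) 1 := by
  intro k
  induction k with
  | zero =>
    intro a limit _
    rw [PySem.List.pyRange_one_eq_nil (by omega)]
    rfl
  | succ k ih =>
    intro a limit hlt
    have hab : a < a + (k + 1 : Nat) := by omega
    rw [PySem.List.pyRange_one_cons hab, pvALoop, pvT_step]
    have hc : ¬ pvT a ≥ limit := by
      have := hlt a (le_refl a) (by omega)
      omega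
    simp only [hc, if_neg, not_false_iff]
    have harg : a + (k + 1 : Nat) = (a + 1) + (k : Nat) := by push_cast; ring
    have := ih (a + 1) limit (by intro m hm1 hm2; exact hlt m (by omega) (by omega))
    rw [show a + 1 - 1 = a by ring] at this
    rw [harg, this]

-- ===== VERDICT (by name: the statement is the Claim_ definition above) =====
theorem sum_until_limit_spec : Claim_equal_sum_until_limit := by
  intro limit _
  unfold Spec_sum_until_limit sum_until_limit sum_until_limit_alt
  obtain ⟨h1, h2, h3, h4⟩ :=
    pvBSearch_props limit 98 1 99 (by omega) (by omega) (by decide)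
  set n := pvBSearch limit 1 99 with hn
  have h0 : (0 : Int) = pvT (1 - 1) := by norm_num [pvT, PySem.Int.floordiv]
  by_cases hreach : limit ≤ pvT n
  · rw [h0, show (100 : Int) = 1 + (99 : Nat) by norm_num]
    exact pvALoop_reached 99 1 limit n h1 (by omega) h3 hreach
  · have hn99 : n = 99 := by
      by_contra hne
      exact hreach (h4 (by omega))
    rw [h0, show (100 : Int) = 1 + (99 : Nat) by norm_num]
    rw [pvALoop_complete 99 1 limit ?_]
    · rw [hn99]; norm_num
    · intro m hm1 hm2
      calc pvT m ≤ pvT 99 := pvT_mono (by omega) (by omega)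
        _ < limit := by rw [← hn99]; omega
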